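/-
  THE SEGMENTS OF `DGifOpen` (dgif_lib.c:167-242; 143 instructions at 108680H; a PROTECTED frame: `Buf[7]`): the assertions at its
  cut points, the segment claims, and the COMPOSITION (segments ⇒ `DGifOpen.spec`), proved here.
  The form: Gif/Spec/ReaderSegs.lean (`DGifGetWord`). Contract: Gif/Spec/Desc.lean.

  THE CUTS (every address is a label `Gif.L.DGifOpen.at_<hex>`, design/cuts/DGifOpen.txt):

      unit   from      to                         what it walks
      P      108680H   1086D0H                    six pushes, `sub rsp, 72`, the three arguments into `r14 r15 r13`, the frame's header, the
                                                  shadow index in `r12`, the two poison stores                    (17 instructions)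
      1      1086D0H   10871AH | 108816H          l.172-184: `malloc(120)` (NULL: `*Error`, return NULL), `memset(gif, 0, 120)`, the
                                                  checked stores `SavedImages = NULL`, `SColorMap = NULL`           (21 instructions)
      2      10871AH   10879EH | 108816H          l.186-202: `calloc(1, 24936)` (NULL: `*Error`, `free(gif)`, return NULL),
                                                  `memset(pv, 0, 24936)`, THE SIX STORES that make the reader: THE FOREST IS ESTABLISHED
                                                                                                                    (37 instructions)
      3      10879EH   1087B9H | 108816H          l.206-214: `InternalRead(gif, Buf, 6)`; short: `*Error`, `free(pv)`, `free(gif)`, NULL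
                                                                                                                    (17 instructions)
      4      1087B9H   1087DAH | 108816H          l.217-225: `Buf[6] = 0`, `strncmp("GIFVER", Buf, 3)`; different: `*Error`, `free(pv)`,
                                                  `free(gif)`, NULL                                                 (18 instructions)
      5      1087DAH   108816H                    l.227-239: `DGifGetScreenDesc(gif)`; GIF_ERROR: `free(pv)`, `free(gif)`, `*Error`, NULL;
                                                  GIF_OK: the checked stores of `gif.Error` and `pv.gif89`          (23 instructions)
      E      108816H   ret                        the store that clears the frame's shadow, `rax = rbx`, `add rsp, 72`, six pops, `ret`
                                                                                                                    (10 instructions)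

  THERE IS NO FOREST until the six stores are done. Before them the assertions say: (after `malloc` + `memset`, `AfterGif`) gif is
  live in the present heap `Hc` and OWNED (`Owns Hc [(gif, 120)]`), and its six pointer / count fields read 0 (`GifZero`). The forest
  `fresh gif pv = ⟨gif, pv, none, none, none, none⟩` and `GifOK` are ESTABLISHED by segment 2, at the cut 10879EH before the first
  InternalRead (`Opened`); segment 2's comment says from which facts. From there on the callees' `Env` is available.
  THE ERROR EXITS free pv, then gif, inside their segment: `Done` only asks the heap's invariant for the heap that results
  (`(Hc.release pv).release gif`): the contract's post says nothing about leaks.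
-/
import Gif.Spec.Desc
import Gif.LabelsAt
namespace Gif.Spec
open X86 X86.User Asan ProgX.Base ProgX.Base.Spec

namespace DGifOpen

/-- The active frames inside the body: the function's own protected frame (`base = RA − 120`), innermost. -/
abbrev framesIn (frames : List (Nat × FrameLayout)) (e : State) : List (Nat × FrameLayout) :=
  ((e.reg .rsp).toNat - 120, Gif.Frames.DGifOpen) :: frames

/-- The forest DGifOpen makes: gif, the private object, and nothing else. -/
abbrev fresh (gif pv : Nat) : Forest := ⟨gif, pv, none, none, none, none⟩

/-- **The six pointer / count fields of the GifFileType at `gif` read 0** (after `memset(gif, 0, 120)`, l.180; `SavedImages` and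
`SColorMap` are stored again at l.183-184): what `Shape (fresh gif pv)` asks of them (`MapAt none`, `SavedAt none`, `ExtsAt none`). -/
structure GifZero (mem : Mem) (gif : Nat) : Prop where
  scm : GifFileType.SColorMap mem gif = 0
  count : GifFileType.ImageCount mem gif = 0
  icm : GifFileType.Image.ColorMap mem gif = 0
  saved : GifFileType.SavedImages mem gif = 0
  extCount : GifFileType.ExtensionBlockCount mem gif = 0
  exts : GifFileType.ExtensionBlocks mem gif = 0

/-- **WHAT EVERY CUT OF THE BODY SHARES** (nothing of it mentions the heap): the state `v` stands at the address `cut`, inside the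
call that was entered at the state `e` (return address `ret`) with the function's precondition. The prologue is done: six registers
saved (`r15 r14 r13 r12 rbp rbx` in push order), the return address still in its slot, `rsp = RA − 120`, `r12` = the shadow index of
the frame (`(RA − 120) >> 3`: the epilogue's store addresses `[r12 + C00000H]`; no instruction of the body writes `r12`); nothing was
written but the function's stack, the frame's 8 shadow bytes and the contract's windows (the heap's region, its shadow, `*Error`,
the cursor); the reader did not go back. The frame's object `Buf[7]` is at `rsp + 32 = RA − 88`. No callee-saved register is left
untouched: all six are pushed. `r13` (`Error`) is NOT here: it holds `Error` at the five cuts of the body (`Body`, `AfterGif`,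
`Opened`: their field `r13`), but `sete r13b` (1087FFH, l.239) overwrites its low byte on the successful way to 108816H.
`pre` holds `ErrPtr H rest frames R (e.reg .rdx).toNat`: `*Error` is NULL or 4 bytes of a stack object of a CALLER's frame, which is
live under every heap and with the own frame pushed (`DGifOpen.errLive` below). -/
structure Core (cut : Word) (H : Heap) (rest : List Obj) (frames : List (Nat × FrameLayout)) (R : Rd) (u₀ e : State)
    (ret : Word) (v : State) : Prop where
  /-- the function was entered at `e` … -/
  entry : AtEntry (conv u₀) Gif.L.DGifOpen.entry (DGifOpen.spec H rest frames R).frame ret e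
  /-- … with its precondition -/
  pre : (DGifOpen.spec H rest frames R).pre e
  rip : v.rip = cut
  /-- six pushes and `sub rsp, 72` below the return address -/
  rsp : v.reg .rsp = e.reg .rsp - 120
  /-- `mov r12, rsp ; shr r12, 3` (108697H, 1086B4H): the shadow index of the frame -/
  r12 : v.reg .r12 = (e.reg .rsp - 120) >>> 3
  /-- the saved registers, in push order (the six pops 108829H … 108831H restore them) -/
  slot_r15 : v.mem.readLE (e.reg .rsp - 8) 8 = (e.reg .r15).toNat
  slot_r14 : v.mem.readLE (e.reg .rsp - 16) 8 = (e.reg .r14).toNat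
  slot_r13 : v.mem.readLE (e.reg .rsp - 24) 8 = (e.reg .r13).toNat
  slot_r12 : v.mem.readLE (e.reg .rsp - 32) 8 = (e.reg .r12).toNat
  slot_rbp : v.mem.readLE (e.reg .rsp - 40) 8 = (e.reg .rbp).toNat
  slot_rbx : v.mem.readLE (e.reg .rsp - 48) 8 = (e.reg .rbx).toNat
  /-- the return address is still in its slot (`ret` at 108833H pops it): no store of the body reaches `[RA, RA + 8)` — the stack
  windows end at `RA`, the heap's region and the shadow lie at or above 800000H, `*Error` and the cursor are stack objects of a
  CALLER's frame, at or above `RA + 8` -/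
  slot_ra : UInt64.ofNat (v.mem.readLE (e.reg .rsp) 8) = ret
  /-- the reader did not go back -/
  rem : rem R v.mem ≤ rem R e.mem
  /-- the footprint so far: the function's stack (`frame = 528`), the shadow of the own frame (`[RA − 120, RA − 56)`), the
  contract's four windows -/
  same : Mem.SameExcept
    [⟨(e.reg .rsp).toNat - 528, (e.reg .rsp).toNat⟩,
     shadowSpan ((e.reg .rsp).toNat - 120) ((e.reg .rsp).toNat - 56),
     ⟨0x800000, 0x1000020⟩,
     ⟨(e.reg .rdx).toNat, (e.reg .rdx).toNat + 4⟩,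
     ⟨R.cur, R.cur + 8⟩] e.mem v.mem
  code : (conv u₀).code.In v.mem
  abi : (conv u₀).inv v

/-- **AFTER THE PROLOGUE** (1086D0H, before `malloc(120)`): `Core`; `r13 = Error` (read by the NULL exit 108834H), `r14 = userData`,
`r15 = readFunc` (stored by segment 2); the heap is the entry's, with the OWN frame pushed; the cursor and the constants are as the pre says (the prologue wrote stack and
shadow only). -/
structure Body (H : Heap) (rest : List Obj) (frames : List (Nat × FrameLayout)) (R : Rd) (u₀ e : State)
    (ret : Word) (v : State) : Prop where
  core : Core Gif.L.DGifOpen.at_1086d0 H rest frames R u₀ e ret v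
  /-- `mov r13, rdx` (108694H): `Error`; read by `test r13, r13` (108834H) and the store `[r13]` (108841H) -/
  r13 : v.reg .r13 = e.reg .rdx
  /-- `mov r14, rdi` (10868EH): `userData` = the cursor's address -/
  r14 : v.reg .r14 = e.reg .rdi
  /-- `mov r15, rsi` (108691H): `readFunc` = the entry of `mem_read` -/
  r15 : v.reg .r15 = e.reg .rsi
  /-- the heap's invariant for the entry's heap, the own frame active, the clean stack ending at the present stack pointer -/
  inv : HeapInv H rest (framesIn frames e) ((e.reg .rsp).toNat - 120) v.mem
  /-- the cursor and the constants, as the pre says -/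
  cursor : CursorOK R v.mem
  consts : Consts v.mem

/-- **AFTER `malloc` + `memset` + the two stores of l.183-184** (10871AH, before `calloc`): the present heap `Hc` (the entry's heap
with one more object) is at the place of `H`; `rbx = gif`, the live 120-byte object, OWNED (`Owns Hc [(gif, 120)]`: with the heap's
invariant it is 16-aligned, in the heap's region, off the stack, the cursor and the constants: `Owns.inside`); its six pointer /
count fields read 0. NO FOREST YET. `r13`, `r14`, `r15` still hold the three arguments. -/
structure AfterGif (H : Heap) (rest : List Obj) (frames : List (Nat × FrameLayout)) (R : Rd) (Hc : Heap) (gif : Nat)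
    (u₀ e : State) (ret : Word) (v : State) : Prop where
  core : Core Gif.L.DGifOpen.at_10871a H rest frames R u₀ e ret v
  /-- `Error`: read by the NULL exit of `calloc` (`test r13, r13` at 10884BH, the store `[r13]` at 108858H) -/
  r13 : v.reg .r13 = e.reg .rdx
  /-- `userData` (stored at 10879AH), `readFunc` (stored at 10878DH): still in their registers -/
  r14 : v.reg .r14 = e.reg .rdi
  r15 : v.reg .r15 = e.reg .rsi
  /-- `mov rbx, rax` (1086DAH): `GifFile` -/
  rbx : (v.reg .rbx).toNat = gif
  /-- the present heap is at the place of the entry's; its invariant, the own frame active -/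
  region : SameRegion H Hc
  inv : HeapInv Hc rest (framesIn frames e) ((e.reg .rsp).toNat - 120) v.mem
  /-- gif is live, with its exact size -/
  own : Owns Hc [(gif, 120)]
  /-- zero-filled: the fields `Shape` will read -/
  zero : GifZero v.mem gif
  /-- the cursor and the constants, as the pre says (nothing written meets them) -/
  cursor : CursorOK R v.mem
  consts : Consts v.mem

/-- **THE READER IS MADE** (cuts 10879EH before `InternalRead`, 1087B9H after it, 1087DAH after `strncmp`): THE FOREST EXISTS. The
present heap `Hc` is at the place of `H`; `rbx = gif`, `rbp = pv`; the state invariant holds for `Hc` and `fresh gif pv` — so the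
callees' `Env Hc rest (framesIn frames e) (fresh gif pv) R s` is `inv` (lowered), `core.pre`'s `HeapPre` (base, limit, text) and
`Ctx` (with `Ctx.push`), and `ok`. The cursor and the constants are in `ok.shape`. `r13 = Error` (every error exit reads it);
`r14`, `r15` are dead. The bytes of `Buf` are not constrained (no check asks for initialised memory). -/
structure Opened (cut : Word) (H : Heap) (rest : List Obj) (frames : List (Nat × FrameLayout)) (R : Rd) (Hc : Heap) (gif pv : Nat)
    (u₀ e : State) (ret : Word) (v : State) : Prop where
  core : Core cut H rest frames R u₀ e ret v
  /-- `Error`: read by the error exits 10886DH, 10889CH, 1088DBH (`test r13, r13`, the checked store `[r13]`); the successful way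
  of segment 5 overwrites its low byte (`sete r13b`, 1087FFH) only after the last cut that states it (1087DAH) -/
  r13 : v.reg .r13 = e.reg .rdx
  /-- `GifFile` -/
  rbx : (v.reg .rbx).toNat = gif
  /-- `mov rbp, rax` (108729H): `Private` -/
  rbp : (v.reg .rbp).toNat = pv
  /-- the present heap is at the place of the entry's; its invariant, the own frame active -/
  region : SameRegion H Hc
  inv : HeapInv Hc rest (framesIn frames e) ((e.reg .rsp).toNat - 120) v.mem
  /-- THE STATE INVARIANT, for the forest of gif and pv alone -/
  ok : GifOK Hc (fresh gif pv) R v.mem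

/-- **BEFORE THE EPILOGUE** (108816H): `Core` (the epilogue reads `r12`, `rbx`, the six save slots and the return address: nothing of
`r13 r14 r15 rbp`, which it pops); the result is in `rbx`; and the contract's postcondition stated of the present
memory, for the heap `Hc`: at the place of `H`, the heap's invariant (own frame still active), the cursor and the constants, and
NULL or a forest with the state invariant and nothing but (possibly) the screen's colour map besides gif and pv. (The epilogue
clears 8 shadow bytes and pops: `HeapInv.epilogue_ra`, `GifOK.storesMem`, `CursorOK.sameExcept`, `Consts.sameExcept`.) -/
structure Done (H : Heap) (rest : List Obj) (frames : List (Nat × FrameLayout)) (R : Rd) (Hc : Heap) (u₀ e : State)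
    (ret : Word) (v : State) : Prop where
  core : Core Gif.L.DGifOpen.at_108816 H rest frames R u₀ e ret v
  /-- the final heap is at the place of the entry's; its invariant, the own frame still active -/
  region : SameRegion H Hc
  inv : HeapInv Hc rest (framesIn frames e) ((e.reg .rsp).toNat - 120) v.mem
  /-- the cursor and the constants (on the non-NULL arm they are in the forest's `GifOK` too) -/
  cursor : CursorOK R v.mem
  consts : Consts v.mem
  /-- NULL, or gif with its forest -/
  res : (v.reg .rbx).toNat = 0 ∨
    ∃ F', (v.reg .rbx).toNat = F'.gif ∧ GifOK Hc F' R v.mem ∧ F'.icm = none ∧ F'.saved = none ∧ F'.pend = none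

/-- **An exit to the epilogue**: `Done` for A heap. -/
def Exit (H : Heap) (rest : List Obj) (frames : List (Nat × FrameLayout)) (R : Rd) (u₀ e : State) (ret : Word) (w : State) : Prop :=
  ∃ (Hc : Heap), Done H rest frames R Hc u₀ e ret w

/-! ### Two facts the segments' proofs need, once -/

/-- **`n` zero bytes read as the number 0** (what `memset(p, 0, n)`'s post delivers, byte by byte, for the fields of `GifZero`). -/
theorem rd_zero_of_bytes (mem : Mem) (a n : Nat) (h : ∀ i, i < n → rd mem (a + i) 1 = 0) : rd mem a n = 0 := by
  unfold rd
  unfold rd at h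
  induction n generalizing a with
  | zero => rfl
  | succ n ih =>
    simp only [Mem.readLE]
    have h0 := h 0 (Nat.succ_pos n)
    rw [Nat.add_zero, Mem.readLE_one] at h0
    have hrest : ∀ i, i < n → mem.readLE (UInt64.ofNat (a + 1 + i)) 1 = 0 := by
      intro i hi
      have := h (i + 1) (Nat.succ_lt_succ hi)
      rw [Nat.add_assoc, Nat.add_comm 1 i]
      exact this
    have e : UInt64.ofNat a + 1 = UInt64.ofNat (a + 1) := by
      rw [UInt64.ofNat_add]
      rfl
    rw [e, ih (a + 1) hrest, h0]

/-- **`*Error` is live under every heap and with one more frame pushed**: it lies in the stack region, so the object of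
`ErrPtr`'s `LiveIn` is a stack object of the caller's frames (a heap object lies at or above 800000H, an object of `rest` off the
stack). What the check `__asan_store4_noabort` of every error exit asks, whatever the heap is by then. -/
theorem errLive {H : Heap} {rest : List Obj} {frames : List (Nat × FrameLayout)} {R : Rd} {p top : Nat} {mem : Mem}
    (h : ErrPtr H rest frames R p) (hp : p ≠ 0) (hinv : HeapInv H rest frames top mem) (H' : Heap) (bF : Nat × FrameLayout) :
    LiveIn (H'.liveObjs ++ rest) (bF :: frames) p 4 := by
  rcases h with h0 | ⟨hl, hlo, hhi, _⟩
  · exact absurd h0 hp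
  · obtain ⟨o, ho, k1, k2⟩ := hl
    rcases List.mem_append.mp ho with hs | hoth
    · refine ⟨o, List.mem_append_left _ ?_, k1, k2⟩
      rw [stackObjs_cons]
      exact List.mem_append_right _ hs
    · exfalso
      rcases List.mem_append.mp hoth with hheap | hr
      · obtain ⟨⟨c, hlive⟩, _⟩ := Heap.live_of_mem_liveObjs hheap
        have h1 := hinv.heap.obj_range hlive
        have h2 := hinv.heap.offStack
        have h3 := hinv.heap.room
        have h4 := hinv.heap.size_le_cap hlive
        simp only at h1 h4
        omega
      · have hoff := hinv.shadow.off o (List.mem_append_right _ hr)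
        unfold OffStack at hoff
        omega

/-! ### The segment claims -/

/-- **Segment P** (the prologue, 108680H … 1086D0H, 17 instructions): six pushes, `sub rsp, 72`, `r14 = rdi`, `r15 = rsi`,
`r13 = rdx`, the frame's three header words, the shadow index in `r12`, the two poison stores (`HeapInv.prologue_ra`; the cursor and
the constants lie off the stack frame and off the shadow). -/
def SegP (Lay : Layout) (μ : Microarch) (u₀ : State) : Prop :=
  ∀ (H : Heap) (rest : List Obj) (frames : List (Nat × FrameLayout)) (R : Rd) (e : State) (ret : Word),
    AtEntry (conv u₀) Gif.L.DGifOpen.entry (DGifOpen.spec H rest frames R).frame ret e →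
    (DGifOpen.spec H rest frames R).pre e →
    ReachVia Lay μ WayInv e (Body H rest frames R u₀ e ret)

/-- **Segment 1** (1086D0H … 10871AH, l.172-184, 21 instructions): `malloc(120)`. NULL (108834H; `FailPost`: the same heap): if
`Error ≠ NULL` the checked store `*Error = 109` (`errLive`; off the cursor by `ErrPtr`), `rbx = 0`: to the epilogue with the heap
`H`. Otherwise `gif = H.next`, the heap `H.push 120 128`: `memset(gif, 0, 120)` (`LiveIn`: the new live object), the checked stores
`SavedImages = NULL` (`gif + 72`), `SColorMap = NULL` (`gif + 24`); `GifZero` from the 120 zero bytes (`rd_zero_of_bytes`);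
`Owns` by `Owns.push_cons` from `Owns.nil`. -/
def Seg1 (Lay : Layout) (μ : Microarch) (u₀ : State) : Prop :=
  ∀ (H : Heap) (rest : List Obj) (frames : List (Nat × FrameLayout)) (R : Rd) (e : State) (ret : Word) (v : State),
    Body H rest frames R u₀ e ret v →
    ReachVia Lay μ WayInv v (fun w =>
      (∃ (Hc : Heap) (gif : Nat), AfterGif H rest frames R Hc gif u₀ e ret w) ∨
      Exit H rest frames R u₀ e ret w)

/-- **Segment 2** (10871AH … 10879EH, l.186-202, 37 instructions): `calloc(1, 24936)`. NULL (10884BH; the same heap `Hc`): `*Error`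
if not NULL, `free(gif)` (live by `own`), `rbx = rbp = 0`: to the epilogue with the heap `Hc.release gif`. Otherwise
`pv = Hc.next`, the heap `Hc' = Hc.push 24936 24944`: `memset(pv, 0, 24936)`, and THE SIX CHECKED STORES: `gif.Private = pv`
(`gif + 112`), `pv.FileHandle = 0` (`pv + 4`), `pv.File = NULL` (`pv + 64`), `pv.FileState = 8` (`pv`), `pv.Read = r15`
(`pv + 72`), `gif.UserData = r14` (`gif + 104`).
**THE FOREST IS ESTABLISHED HERE**: `GifOK Hc' (fresh gif pv) R w.mem`, from exactly these facts:
  `owns`     `Owns Hc' [(gif, 120), (pv, 24936)]`: `own` through the allocation, the new object in front (`Owns.push_cons`), the two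
             in the forest's order (`Owns.perm`); `(fresh gif pv).owned` is this list (every `objs` of `none` is `[]`);
  `priv`     the store at `gif + 112`; `user`: the store at `gif + 104` of `r14 = e.rdi`, and the pre's `(e.rdi).toNat = R.cur`;
  `scm icm saved pend`   `GifZero` (the six fields: none of the six stores meets `[gif + 24, gif + 96)`; `calloc` and `memset`
             write the new object, its header, its shadow, the control cell: off gif, which is another object);
  `read`     the store at `pv + 72` of `r15 = e.rsi`, and the pre's `(e.rsi).toNat = memReadEntry`;
  `file state`   the stores at `pv + 64`, `pv`;
  `cursor consts`   the assertion's `cursor`, `consts` (every window written lies in the heap's region, its shadow or the function's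
             stack, all off the cursor — `Ctx.cursor_range`: it lies at or above the clean stack's end — and off the constants). -/
def Seg2 (Lay : Layout) (μ : Microarch) (u₀ : State) : Prop :=
  ∀ (H : Heap) (rest : List Obj) (frames : List (Nat × FrameLayout)) (R : Rd) (Hc : Heap) (gif : Nat) (e : State) (ret : Word)
    (v : State),
    AfterGif H rest frames R Hc gif u₀ e ret v →
    ReachVia Lay μ WayInv v (fun w =>
      (∃ (Hc' : Heap) (pv : Nat), Opened Gif.L.DGifOpen.at_10879e H rest frames R Hc' gif pv u₀ e ret w) ∨
      Exit H rest frames R u₀ e ret w)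

/-- **Segment 3** (10879EH … 1087B9H, l.206-214, 17 instructions): `InternalRead(gif, Buf, 6)` into the frame's object `Buf`
(`rsi = rsp + 32`, 7 bytes; `BufOK`: a stack object of the own frame, below the cursor). 6 bytes: on to 1087B9H (same heap, same
forest). Fewer (10886DH): `*Error = 102` if not NULL, `free(pv)`, `free(gif)` (both live and different by `ok.owns`), `ebx = 0`: to
the epilogue with the heap `(Hc.release pv).release gif`; the cursor and the constants from `InternalRead`'s `Back`. -/
def Seg3 (Lay : Layout) (μ : Microarch) (u₀ : State) : Prop :=
  ∀ (H : Heap) (rest : List Obj) (frames : List (Nat × FrameLayout)) (R : Rd) (Hc : Heap) (gif pv : Nat) (e : State) (ret : Word)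
    (v : State),
    Opened Gif.L.DGifOpen.at_10879e H rest frames R Hc gif pv u₀ e ret v →
    ReachVia Lay μ WayInv v (fun w =>
      Opened Gif.L.DGifOpen.at_1087b9 H rest frames R Hc gif pv u₀ e ret w ∨
      Exit H rest frames R u₀ e ret w)

/-- **Segment 4** (1087B9H … 1087DAH, l.217-225, 18 instructions): the store `Buf[6] = 0` (`[rsp + 38]`: the function's stack, not
checked), `strncmp(141240H, Buf, 3)`: the first argument is the registered global `Gif.Globals.LC7` ("GIFVER", 7 bytes: `Ctx.stamp`),
the second the frame's object; `strncmp` writes nothing. Equal: on to 1087DAH. Different (10889CH): `*Error = 103` if not NULL,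
`free(pv)`, `free(gif)`, `ebx = 0`: to the epilogue with the heap `(Hc.release pv).release gif`. -/
def Seg4 (Lay : Layout) (μ : Microarch) (u₀ : State) : Prop :=
  ∀ (H : Heap) (rest : List Obj) (frames : List (Nat × FrameLayout)) (R : Rd) (Hc : Heap) (gif pv : Nat) (e : State) (ret : Word)
    (v : State),
    Opened Gif.L.DGifOpen.at_1087b9 H rest frames R Hc gif pv u₀ e ret v →
    ReachVia Lay μ WayInv v (fun w =>
      Opened Gif.L.DGifOpen.at_1087da H rest frames R Hc gif pv u₀ e ret w ∨
      Exit H rest frames R u₀ e ret w)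

/-- **Segment 5** (1087DAH … 108816H, l.227-239, 23 instructions): `DGifGetScreenDesc(gif)` (pre: `Env`, `(fresh gif pv).scm = none`;
post: A heap `H'`, A forest `F'` with `Back2`, `(fresh gif pv).SameButScm F'`). GIF_ERROR (1088CBH; `F'.scm = none`: nothing but
gif and pv is owned): `free(pv)`, `free(gif)`, `*Error = 104` if not NULL, `ebx = 0`: to the epilogue with the heap
`(H'.release pv).release gif`. GIF_OK: the checked stores `gif.Error = 0` (`gif + 96`) and `pv.gif89` (`pv + 24928`, a byte): scalar
windows of gif and of pv's body (`Loose`): to the epilogue with `rbx = gif = F'.gif`, the heap `H'`, the forest `F'`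
(`icm saved pend` are `none` by `SameButScm`). -/
def Seg5 (Lay : Layout) (μ : Microarch) (u₀ : State) : Prop :=
  ∀ (H : Heap) (rest : List Obj) (frames : List (Nat × FrameLayout)) (R : Rd) (Hc : Heap) (gif pv : Nat) (e : State) (ret : Word)
    (v : State),
    Opened Gif.L.DGifOpen.at_1087da H rest frames R Hc gif pv u₀ e ret v →
    ReachVia Lay μ WayInv v (Exit H rest frames R u₀ e ret)

/-- **Segment E** (the epilogue, 108816H … `ret`, 10 instructions): the 8-byte store that clears the frame's shadow, `mov rax, rbx`,
`add rsp, 72`, six pops, `ret`. The contract's post from `Done`: `region`, `inv` through `HeapInv.epilogue_ra`, `cursor`, `consts`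
and `GifOK` through the shadow store, `core.rem`, `res`. -/
def SegE (Lay : Layout) (μ : Microarch) (u₀ : State) : Prop :=
  ∀ (H : Heap) (rest : List Obj) (frames : List (Nat × FrameLayout)) (R : Rd) (Hc : Heap) (e : State) (ret : Word) (v : State),
    Done H rest frames R Hc u₀ e ret v →
    ReachVia Lay μ WayInv v (Returned (conv u₀) (DGifOpen.spec H rest frames R) e ret)

/-- **The composition of `DGifOpen`**: the seven segments chain into the function's contract. -/
theorem compose {Lay : Layout} {μ : Microarch} {u₀ : State} (hP : SegP Lay μ u₀) (h1 : Seg1 Lay μ u₀) (h2 : Seg2 Lay μ u₀)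
    (h3 : Seg3 Lay μ u₀) (h4 : Seg4 Lay μ u₀) (h5 : Seg5 Lay μ u₀) (hE : SegE Lay μ u₀) :
    ∀ (H : Heap) (rest : List Obj) (frames : List (Nat × FrameLayout)) (R : Rd),
      Calls Lay μ WayInv (conv u₀) Gif.L.DGifOpen.entry (DGifOpen.spec H rest frames R) := by
  intro H rest frames R e ret he hp
  -- from any exit to the epilogue: segment E
  have tail : ∀ w, Exit H rest frames R u₀ e ret w →
      ReachVia Lay μ WayInv w (Returned (conv u₀) (DGifOpen.spec H rest frames R) e ret) := by
    intro w hw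
    obtain ⟨Hc, hd⟩ := hw
    exact hE H rest frames R Hc e ret w hd
  refine (hP H rest frames R e ret he hp).trans ?_
  intro v1 hv1
  refine (h1 H rest frames R e ret v1 hv1).trans ?_
  intro v2 hv2
  rcases hv2 with hg | hd2
  · obtain ⟨Hc, gif, hgif⟩ := hg
    refine (h2 H rest frames R Hc gif e ret v2 hgif).trans ?_
    intro v3 hv3
    rcases hv3 with ho | hd3
    · obtain ⟨Hc', pv, hopen⟩ := ho
      refine (h3 H rest frames R Hc' gif pv e ret v3 hopen).trans ?_
      intro v4 hv4
      rcases hv4 with ho4 | hd4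
      · refine (h4 H rest frames R Hc' gif pv e ret v4 ho4).trans ?_
        intro v5 hv5
        rcases hv5 with ho5 | hd5
        · refine (h5 H rest frames R Hc' gif pv e ret v5 ho5).trans ?_
          intro v6 hv6
          exact tail v6 hv6
        · exact tail v5 hd5
      · exact tail v4 hd4
    · exact tail v3 hd3
  · exact tail v2 hd2

end DGifOpen

end Gif.Spec
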